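-- pv_equiv track=rewrite | github.com/AlainKuiete/pythoncourse | 02_assignment.py | exercise10
-- ===== SOURCE A (Python) =====
-- def exercise10(sentence):
--     sentence = sentence.swapcase()
--
--     # Exercise10 receives an arbitrary string. Return the sentence backwards with the cases inverted and spaces an underscore _, i.e. HelLo returns OlLEh
--     reversed = ''
--
--     # ------ Place code below here \/ \/ \/ ------
--     for i in range(len(sentence)-1, -1, -1):
--         if sentence[i]==" ":
--            reversed = reversed + "_"
--         elif sentence[i]=="_":
--             reversed = reversed + " "
--         else:
--             reversed = reversed + sentence[i]
--
--     # ------ Place code above here /\ /\ /\ ------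
--     return reversed
-- ===== SOURCE B (Python) =====
-- def exercise10(sentence):
--     return sentence.swapcase()[::-1].translate(str.maketrans(" _", "_ "))
-- ===== Notes on version B (the rewrite author's own statement) =====
-- stated objective: faster
-- what changed: Replaces the descending index loop with per-character string-concatenation accumulator and if/elif branches by a loop-free pipeline: swapcase, slice-reverse, and one translate pass over a precomputed space/underscore table.
import Mathlib
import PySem

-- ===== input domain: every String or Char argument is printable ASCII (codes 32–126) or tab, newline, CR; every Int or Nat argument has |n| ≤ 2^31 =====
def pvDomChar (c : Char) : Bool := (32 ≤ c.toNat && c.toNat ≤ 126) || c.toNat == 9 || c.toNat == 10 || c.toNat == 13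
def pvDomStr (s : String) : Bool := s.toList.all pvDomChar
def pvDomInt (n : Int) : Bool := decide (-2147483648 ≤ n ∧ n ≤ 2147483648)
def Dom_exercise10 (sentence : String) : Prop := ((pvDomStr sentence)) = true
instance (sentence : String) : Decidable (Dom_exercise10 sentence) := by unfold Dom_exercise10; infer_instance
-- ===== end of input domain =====

-- B replaces A's descending index loop and if/elif accumulator by a loop-free
-- swapcase → reverse-slice → translation-table pipeline (idiomatic; return value only).

-- str.swapcase() per character, exact on the ASCII domain (both sources call this builtin)
def pvSwapChar (c : Char) : Char :=
  if PySem.Chars.isupper c then PySem.Chars.lowerChar c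
  else if PySem.Chars.islower c then PySem.Chars.upperChar c
  else c

-- ===== PORT A =====
def exercise10 (sentence : String) : String :=
  -- sentence = sentence.swapcase(), then the descending index loop building `reversed`
  String.mk
    ((PySem.List.pyRange (((sentence.toList.map pvSwapChar).length : Int) - 1) (-1) (-1)).foldl
      (fun acc i =>
        let c := PySem.List.pyGetD (sentence.toList.map pvSwapChar) i ' '   -- sentence[i]; i always in range
        if c = ' ' then acc ++ ['_']
        else if c = '_' then acc ++ [' ']
        else acc ++ [c]) [])

-- ===== PORT B =====
-- the str.maketrans(" _", "_ ") table applied per character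
def pvTr (c : Char) : Char := if c = ' ' then '_' else if c = '_' then ' ' else c

def exercise10_alt (sentence : String) : String :=
  String.mk (((sentence.toList.map pvSwapChar).reverse).map pvTr)   -- swapcase()[::-1].translate(...)

-- ===== PRECONDITION & SPEC =====
def Spec_exercise10 (sentence : String) (out : String) : Prop := out = exercise10_alt sentence
instance (sentence : String) (out : String) : Decidable (Spec_exercise10 sentence out) := by unfold Spec_exercise10; infer_instance

-- ===== CLAIM (what is proved, stated in full; the proofs are below) =====
def Claim_equal_exercise10 : Prop := ∀ (sentence : String), Dom_exercise10 sentence → Spec_exercise10 sentence (exercise10 sentence)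

-- ===== LEMMAS AND PROOFS =====

lemma pvLoopA (cs : List Char) : ∀ (n : Nat) (acc : List Char), n ≤ cs.length →
    (PySem.List.pyRange ((n : Int) - 1) (-1) (-1)).foldl
      (fun acc i =>
        let c := PySem.List.pyGetD cs i ' '
        if c = ' ' then acc ++ ['_']
        else if c = '_' then acc ++ [' ']
        else acc ++ [c]) acc
    = acc ++ ((cs.take n).map pvTr).reverse := by
  intro n
  induction n with
  | zero =>
      intro acc _
      rw [show ((0:Nat) : Int) - 1 = -1 by ring, PySem.List.pyRange_neg_one_eq_nil le_rfl]
      simp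
  | succ n ih =>
      intro acc hn
      have hlt : n < cs.length := by omega
      rw [show ((n + 1 : Nat) : Int) - 1 = ((n : Int) + 1) - 1 by push_cast; ring,
          PySem.List.pyRange_neg_one_cons (by omega : (-1:Int) < ((n : Int) + 1) - 1)]
      simp only [List.foldl_cons]
      have hstep : (let c := PySem.List.pyGetD cs (((n : Int) + 1) - 1) ' '
          if c = ' ' then acc ++ ['_']
          else if c = '_' then acc ++ [' ']
          else acc ++ [c]) = acc ++ [pvTr cs[n]] := by
        have : PySem.List.pyGetD cs (((n : Int) + 1) - 1) ' ' = cs[n] := by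
          rw [show ((n : Int) + 1) - 1 = (n : Int) by ring]
          simp [PySem.List.pyGetD_natCast, List.getD_eq_getElem?_getD, hlt]
        rw [this]
        simp only [pvTr]
        split_ifs <;> rfl
      rw [hstep, show ((n : Int) + 1) - 1 - 1 = (n : Int) - 1 by ring,
          ih (acc ++ [pvTr cs[n]]) (by omega)]
      rw [show cs.take (n+1) = cs.take n ++ [cs[n]] by
            rw [List.take_add_one]; simp [List.getElem?_eq_getElem hlt],
          List.map_append, List.reverse_append]
      simp

-- ===== VERDICT (by name: the statement is the Claim_ definition above) =====
theorem exercise10_spec : Claim_equal_exercise10 := by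
  intro sentence _
  unfold Spec_exercise10 exercise10 exercise10_alt
  rw [pvLoopA _ _ _ (le_refl _)]
  rw [List.take_of_length_le (by simp)]
  simp [List.map_reverse]
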